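-- pv_equiv track=rewrite | github.com/ahanif19/dsp | lessons/python_intro/questions/calc_row_value/calc_row_value_ah.py | calc_row_value
-- ===== SOURCE A (Python) =====
-- def calc_row_value(input_string):
--
--     ''' Take an input_string. For each odd digit in the string,
--         multiply the value of the digit by its position. For each
--         even digit, multiply the value of digit by 5. Sum the resulting
--         values and return the sum.
--
--         Before performing the calculation, remove all white space from
--         the string.
--
--         If the input isn't a string, throw a ValueError.
--     '''
--     if not isinstance(input_string,str):
--         raise ValueError("input_string must be a string")
--
--     val = 0
--     input_string_no_white_space = input_string.strip()
--     for pos,digit in enumerate(input_string_no_white_space,1):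
--         if pos % 2 == 0:
--             val -= int(digit)*5
--         else:
--             val += int(digit)*pos
--     return val
-- ===== SOURCE B (Python) =====
-- def calc_row_value(input_string):
--     if not isinstance(input_string, str):
--         raise ValueError("input_string must be a string")
--     s = input_string.strip()
--     it = iter(s)
--     total = 0
--     for k, (a, b) in enumerate(zip(it, it)):
--         total += int(a) * (2 * k + 1) - 5 * int(b)
--     if len(s) % 2:
--         total += int(s[-1]) * len(s)
--     return total
-- ===== Notes on version B (the rewrite author's own statement) =====
-- stated objective: alternative
-- what changed: Replaces A's per-character loop with its parity branch by pair-chunked iteration (the zip(it, it) grouper idiom): each step consumes a (digit, digit) pair with weights 2k+1 and -5 and no parity test, and an odd trailing digit is added once as int(s[-1])*len(s).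
import Mathlib
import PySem

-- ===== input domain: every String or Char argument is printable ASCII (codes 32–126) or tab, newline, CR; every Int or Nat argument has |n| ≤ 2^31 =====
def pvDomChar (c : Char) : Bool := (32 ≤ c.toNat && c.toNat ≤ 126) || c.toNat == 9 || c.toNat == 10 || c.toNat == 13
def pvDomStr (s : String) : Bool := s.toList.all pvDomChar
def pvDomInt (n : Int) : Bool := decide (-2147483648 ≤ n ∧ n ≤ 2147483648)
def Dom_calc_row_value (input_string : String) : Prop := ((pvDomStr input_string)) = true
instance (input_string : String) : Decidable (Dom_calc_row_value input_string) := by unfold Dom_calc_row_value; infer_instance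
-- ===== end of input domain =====

-- B replaces A's per-character loop (parity branch inside) by pair-chunked iteration
-- (the zip(it,it) grouper idiom): one step per digit pair, trailing odd digit added once.


-- int(ch) for a one-character string; the none case (ValueError) is excluded by Pre_
def pvInt1 (c : Char) : Int := (PySem.Int.ofChars? [c]).getD 0

-- ===== PORT A =====
def calc_row_value (input_string : String) : Int :=
  let cs := (PySem.Str.strip input_string).toList
  (PySem.List.enumerate cs 1).foldl
    (fun val pd =>
      if PySem.Int.mod pd.1 2 == 0 then val - pvInt1 pd.2 * 5
      else val + pvInt1 pd.2 * pd.1) 0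

-- ===== PORT B =====
-- zip(it, it) over one iterator of the chars: the consecutive disjoint pairs
def pvPairs : List Char → List (Char × Char)
  | a :: b :: rest => (a, b) :: pvPairs rest
  | _ => []

def calc_row_value_alt (input_string : String) : Int :=
  let s := (PySem.Str.strip input_string).toList
  let total := (PySem.List.enumerate (pvPairs s) 0).foldl
      (fun total kab => total + pvInt1 kab.2.1 * (2 * kab.1 + 1) - 5 * pvInt1 kab.2.2) 0
  if PySem.Int.mod (s.length : Int) 2 == 1 then
    total + pvInt1 (PySem.List.pyGetD s (-1) ' ') * (s.length : Int)
  else total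

-- ===== PRECONDITION & SPEC =====
-- Pre_ excludes exactly the inputs where int(digit) raises ValueError in both Pythons:
-- some character of the stripped string is not a decimal digit.
def Pre_calc_row_value (input_string : String) : Prop :=
  (PySem.Str.strip input_string).toList.all PySem.Chars.isdigit = true
instance (input_string : String) : Decidable (Pre_calc_row_value input_string) := by
  unfold Pre_calc_row_value; infer_instance
def pvWitness_calc_row_value : String := " 30172 "

def Spec_calc_row_value (input_string : String) (out : Int) : Prop := out = calc_row_value_alt input_string
instance (input_string : String) (out : Int) : Decidable (Spec_calc_row_value input_string out) := by unfold Spec_calc_row_value; infer_instance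

-- ===== CLAIM (what is proved, stated in full; the proofs are below) =====
def Claim_equal_calc_row_value : Prop := ∀ (input_string : String), Dom_calc_row_value input_string → Pre_calc_row_value input_string → Spec_calc_row_value input_string (calc_row_value input_string)

-- ===== LEMMAS AND PROOFS =====

-- common reference value: position-indexed sum starting at position p
def pvSpec : List Char → Int → Int
  | [], _ => 0
  | c :: rest, p =>
      (if PySem.Int.mod p 2 == 0 then -(pvInt1 c * 5) else pvInt1 c * p) + pvSpec rest (p + 1)

-- the char zip(it, it) leaves unpaired (odd length: the last one)
def pvTail : List Char → Option Char
  | [] => none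
  | [c] => some c
  | _ :: _ :: rest => pvTail rest

def pvTailTerm (cs : List Char) (p : Int) : Int :=
  match pvTail cs with
  | some c => pvInt1 c * (p + cs.length - 1)
  | none => 0

lemma A_fold_eq_spec (cs : List Char) (p v : Int) :
    (PySem.List.enumerate cs p).foldl
      (fun val pd =>
        if PySem.Int.mod pd.1 2 == 0 then val - pvInt1 pd.2 * 5
        else val + pvInt1 pd.2 * pd.1) v = v + pvSpec cs p := by
  induction cs generalizing p v with
  | nil => simp [pvSpec, PySem.List.enumerate_nil]
  | cons c rest ih =>
      rw [PySem.List.enumerate_cons, List.foldl_cons, ih, pvSpec]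
      split <;> ring

lemma mod_two_odd (k : Int) : (PySem.Int.mod (2 * k + 1) 2 == 0) = false := by
  rw [PySem.Int.mod_eq_emod_of_pos (by norm_num : (0:Int) < 2)]
  exact beq_eq_false_iff_ne.mpr (by omega)

lemma mod_two_even (k : Int) : (PySem.Int.mod (2 * k + 2) 2 == 0) = true := by
  rw [PySem.Int.mod_eq_emod_of_pos (by norm_num : (0:Int) < 2)]
  exact beq_iff_eq.mpr (by omega)

lemma B_fold_eq_spec (cs : List Char) (k t : Int) :
    (PySem.List.enumerate (pvPairs cs) k).foldl
      (fun total kab => total + pvInt1 kab.2.1 * (2 * kab.1 + 1) - 5 * pvInt1 kab.2.2) t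
      = t + pvSpec cs (2 * k + 1) - pvTailTerm cs (2 * k + 1) := by
  induction cs using pvPairs.induct generalizing k t with
  | case1 a b rest ih =>
      rw [pvPairs, PySem.List.enumerate_cons, List.foldl_cons, ih (k + 1)]
      have hs : pvSpec (a :: b :: rest) (2 * k + 1)
          = pvInt1 a * (2 * k + 1) - 5 * pvInt1 b + pvSpec rest (2 * (k + 1) + 1) := by
        show (if _ then _ else _) + ((if _ then _ else _) + _) = _
        rw [mod_two_odd k, show (2 : Int) * k + 1 + 1 = 2 * k + 2 by ring, mod_two_even k]
        simp only [Bool.false_eq_true, if_false, if_true]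
        rw [show (2 : Int) * k + 2 + 1 = 2 * (k + 1) + 1 by ring]
        ring
      have ht : pvTailTerm (a :: b :: rest) (2 * k + 1)
          = pvTailTerm rest (2 * (k + 1) + 1) := by
        unfold pvTailTerm
        show (match pvTail rest with | some c => _ | none => _) = _
        cases pvTail rest with
        | none => rfl
        | some c => simp only [List.length_cons]; push_cast; ring_nf
      rw [hs, ht]; ring
  | case2 cs h1 =>
      match cs, h1 with
      | [], _ =>
          simp [pvPairs, pvSpec, pvTailTerm, pvTail, PySem.List.enumerate_nil]
      | [c], _ =>
          show t = t + ((if _ then _ else _) + 0) - _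
          rw [mod_two_odd k]
          simp only [Bool.false_eq_true, if_false, add_zero]
          unfold pvTailTerm
          show t = t + pvInt1 c * (2 * k + 1) - pvInt1 c * (2 * k + 1 + ((1 : Nat) : Int) - 1)
          push_cast; ring
      | a :: b :: r, h => exact (h a b r rfl).elim

lemma pvTail_eq (cs : List Char) :
    pvTail cs = if cs.length % 2 = 1 then cs.getLast? else none := by
  induction cs using pvTail.induct with
  | case1 => rfl
  | case2 c => rfl
  | case3 a b rest ih =>
      rw [pvTail, ih]
      have hL : (a :: b :: rest).length % 2 = rest.length % 2 := by
        simp only [List.length_cons]; omega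
      rw [hL]
      rcases rest with _ | ⟨c, rest'⟩
      · simp
      · rw [List.getLast?_cons_cons, List.getLast?_cons_cons]

lemma pyGetD_neg_one (cs : List Char) (h : cs ≠ []) (c : Char)
    (hc : cs.getLast? = some c) : PySem.List.pyGetD cs (-1) ' ' = c := by
  have hlen : 0 < cs.length := List.length_pos_iff.mpr h
  simp only [PySem.List.pyGetD, PySem.List.pyGet?, PySem.List.pyIdx?]
  rw [if_neg (by omega), if_pos (by omega)]
  rw [List.getLast?_eq_getElem?] at hc
  simpa [show (-(-1:Int)).toNat = 1 by decide] using congrArg (Option.getD · ' ') hc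

-- A = B, stated on the stripped char list (both ports zeta-reduce to this instance)
lemma main_eq (cs : List Char) :
    (PySem.List.enumerate cs 1).foldl
      (fun val pd =>
        if PySem.Int.mod pd.1 2 == 0 then val - pvInt1 pd.2 * 5
        else val + pvInt1 pd.2 * pd.1) 0
    = (if PySem.Int.mod (cs.length : Int) 2 == 1 then
        ((PySem.List.enumerate (pvPairs cs) 0).foldl
          (fun total kab => total + pvInt1 kab.2.1 * (2 * kab.1 + 1) - 5 * pvInt1 kab.2.2) 0)
          + pvInt1 (PySem.List.pyGetD cs (-1) ' ') * (cs.length : Int)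
      else
        (PySem.List.enumerate (pvPairs cs) 0).foldl
          (fun total kab => total + pvInt1 kab.2.1 * (2 * kab.1 + 1) - 5 * pvInt1 kab.2.2) 0) := by
  rw [A_fold_eq_spec, B_fold_eq_spec,
      PySem.Int.mod_eq_emod_of_pos (by norm_num : (0:Int) < 2)]
  norm_num
  by_cases hpar : (cs.length : Int) % 2 = 1
  · rw [if_pos hpar]
    have hne : cs ≠ [] := by
      intro h0; rw [h0] at hpar; simp at hpar
    obtain ⟨c, hc⟩ : ∃ c, cs.getLast? = some c := by
      cases h : cs.getLast? with
      | none => exact absurd (List.getLast?_eq_none_iff.mp h) hne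
      | some c => exact ⟨c, rfl⟩
    have htail : pvTail cs = some c := by
      rw [pvTail_eq, if_pos (by omega), hc]
    rw [pyGetD_neg_one cs hne c hc]
    unfold pvTailTerm
    rw [htail]
    ring
  · rw [if_neg hpar]
    have htail : pvTail cs = none := by
      rw [pvTail_eq, if_neg (by omega)]
    unfold pvTailTerm
    rw [htail]
    ring

-- ===== VERDICT (by name: the statement is the Claim_ definition above) =====
theorem calc_row_value_spec : Claim_equal_calc_row_value := by
  intro s _ _
  exact main_eq ((PySem.Str.strip s).toList)
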